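-- pv_equiv track=rewrite | github.com/zzz136454872/leetcode | sandyLandManagement.py | sandyLandManagement
-- ===== SOURCE A (Python) =====
-- from typing import List
--
-- def sandyLandManagement(size: int) -> List[List[int]]:
--     res = []
--
--     for i in range(size):
--         j = 1
--
--         while j <= 2 * i + 1:
--             res.append([i + 1, j])
--             j += 4
--
--         if j != 2 * i + 5:
--             res.append([i + 1, 2 * i + 1])
--
--     return res
-- ===== SOURCE B (Python) =====
-- from typing import List
--
-- def sandyLandManagement(size: int) -> List[List[int]]:
--     res = []
--     cols = []  # second coordinates of the previous row, updated incrementally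
--     for i in range(size):
--         if i > 0 and i % 2 == 0:
--             cols = cols[:-1]
--         cols = cols + [2 * i + 1]
--         res += [[i + 1, c] for c in cols]
--     return res
-- ===== Notes on version B (the rewrite author's own statement) =====
-- stated objective: alternative
-- what changed: B maintains the row's column list as state carried across rows, updating it incrementally (drop the last entry on even rows, append the new odd bound) instead of regenerating each row with A's step-4 while-loop counter and its parity-correcting conditional append.
import Mathlib
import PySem

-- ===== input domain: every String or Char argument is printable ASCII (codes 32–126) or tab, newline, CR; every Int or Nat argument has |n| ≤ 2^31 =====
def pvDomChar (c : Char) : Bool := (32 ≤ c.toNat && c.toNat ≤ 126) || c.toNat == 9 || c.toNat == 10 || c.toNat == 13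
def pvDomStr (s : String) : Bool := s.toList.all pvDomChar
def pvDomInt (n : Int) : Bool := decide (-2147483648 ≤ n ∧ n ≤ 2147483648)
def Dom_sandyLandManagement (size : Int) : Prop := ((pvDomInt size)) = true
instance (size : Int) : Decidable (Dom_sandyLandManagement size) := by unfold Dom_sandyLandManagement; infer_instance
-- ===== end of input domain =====

-- B maintains the row's column list as state carried across rows, updating it incrementally
-- (drop the last entry on even rows, append the new odd bound) instead of regenerating each row
-- with A's step-4 while-loop counter and parity-correcting conditional append (objective: alternative).

-- ===== PORT A =====
-- the `while j <= 2*i+1: res.append([i+1,j]); j += 4` loop, returning the final res and final j;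
-- the Nat fuel is an upper bound on the remaining iterations and only makes the recursion
-- structural: with enough fuel (as pvAWhile supplies) the guard never fires
def pvAWhileF : Nat → Int → Int → List (List Int) → List (List Int) × Int
  | 0, _, j, res => (res, j)
  | fuel + 1, i, j, res =>
      if j ≤ 2 * i + 1 then pvAWhileF fuel i (j + 4) (res ++ [[i + 1, j]])
      else (res, j)

def pvAWhile (i j : Int) (res : List (List Int)) : List (List Int) × Int :=
  pvAWhileF (2 * i + 2 - j).toNat i j res

def sandyLandManagement (size : Int) : List (List Int) :=
  (PySem.List.pyRange 0 size 1).foldl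
    (fun res i =>
      if (pvAWhile i 1 res).2 ≠ 2 * i + 5 then (pvAWhile i 1 res).1 ++ [[i + 1, 2 * i + 1]]
      else (pvAWhile i 1 res).1)
    []

-- ===== PORT B =====
-- one iteration of B's loop body on the state (res, cols);
-- `cols[:-1]` is ported as List.dropLast (exact: the slice drops exactly the last element, [] on [])
def pvBStep (st : List (List Int) × List Int) (i : Int) : List (List Int) × List Int :=
  let cols := (if 0 < i ∧ PySem.Int.mod i 2 = 0 then st.2.dropLast else st.2) ++ [2 * i + 1]
  (st.1 ++ cols.map (fun c => [i + 1, c]), cols)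

def sandyLandManagement_alt (size : Int) : List (List Int) :=
  ((PySem.List.pyRange 0 size 1).foldl pvBStep ([], [])).1

-- ===== PRECONDITION & SPEC =====
def Spec_sandyLandManagement (size : Int) (out : List (List Int)) : Prop := out = sandyLandManagement_alt size
instance (size : Int) (out : List (List Int)) : Decidable (Spec_sandyLandManagement size out) := by unfold Spec_sandyLandManagement; infer_instance

-- ===== CLAIM (what is proved, stated in full; the proofs are below) =====
def Claim_equal_sandyLandManagement : Prop := ∀ (size : Int), Dom_sandyLandManagement size → Spec_sandyLandManagement size (sandyLandManagement size)

-- ===== LEMMAS AND PROOFS =====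

-- the column list A emits for row i (step-4 values below 2i+1, then 2i+1 itself)
def pvRow (i : Int) : List Int := PySem.List.pyRange 1 (2 * i + 1) 4 ++ [2 * i + 1]

-- B's carried state after processing rows 0..n-1
def pvCols : Nat → List Int
  | 0 => []
  | n + 1 => pvRow n

theorem pvPyRange_four_nil (a b : Int) (h : b ≤ a) : PySem.List.pyRange a b 4 = [] := by
  rw [PySem.List.pyRange_of_pos a b (by norm_num), if_neg (by omega), List.range_zero, List.map_nil]

theorem pvPyRange_four_cons (a b : Int) (h : a < b) :
    PySem.List.pyRange a b 4 = a :: PySem.List.pyRange (a + 4) b 4 := by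
  rw [PySem.List.pyRange_of_pos a b (by norm_num), PySem.List.pyRange_of_pos (a + 4) b (by norm_num),
    if_pos h]
  have hc : ((b - a + 4 - 1) / 4).toNat
      = (if a + 4 < b then ((b - (a + 4) + 4 - 1) / 4).toNat else 0) + 1 := by
    split_ifs with h2 <;> omega
  rw [hc, List.range_succ_eq_map, List.map_cons, List.map_map]
  refine congrArg₂ List.cons (by simp) (List.map_congr_left fun k _ => ?_)
  simp only [Function.comp]
  push_cast
  ring

-- extending a step-4 range past a congruent endpoint appends that endpoint
theorem pvE1 (a b : Int) (h : (b - a) % 4 = 0) (hab : a ≤ b) :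
    PySem.List.pyRange a (b + 2) 4 = PySem.List.pyRange a b 4 ++ [b] := by
  by_cases hlt : a < b
  · rw [pvPyRange_four_cons a (b + 2) (by omega), pvPyRange_four_cons a b hlt,
      pvE1 (a + 4) b (by omega) (by omega)]
    simp
  · have : a = b := by omega
    subst this
    rw [pvPyRange_four_cons a (a + 2) (by omega), pvPyRange_four_nil (a + 4) (a + 2) (by omega),
      pvPyRange_four_nil a a le_rfl]
    simp
termination_by (b - a).toNat
decreasing_by omega

-- a step-4 range is unchanged by moving the bound up by 2 across a gap of residue 2
theorem pvE2 (a b : Int) (h : (b - a) % 4 = 2) :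
    PySem.List.pyRange a b 4 = PySem.List.pyRange a (b + 2) 4 := by
  by_cases hlt : a < b
  · rw [pvPyRange_four_cons a b hlt, pvPyRange_four_cons a (b + 2) (by omega),
      pvE2 (a + 4) b (by omega)]
  · rw [pvPyRange_four_nil a b (by omega), pvPyRange_four_nil a (b + 2) (by omega)]
termination_by (b - a).toNat
decreasing_by omega

-- B's incremental column update reproduces row n's column list
theorem pvColsStep (n : Nat) :
    ((if 0 < (n : Int) ∧ PySem.Int.mod (n : Int) 2 = 0 then (pvCols n).dropLast else pvCols n)
      ++ [2 * (n : Int) + 1]) = pvRow (n : Int) := by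
  cases n with
  | zero =>
      rw [if_neg (by simp)]
      simp [pvCols, pvRow, pvPyRange_four_nil 1 1 le_rfl]
  | succ m =>
      have hmod : PySem.Int.mod ((m : Int) + 1) 2 = ((m : Int) + 1) % 2 :=
        PySem.Int.mod_eq_emod_of_pos (by omega)
      rcases Nat.even_or_odd m with he | ho
      · -- m even, so index m+1 is odd: guard false, plain append
        obtain ⟨k, hk⟩ := he
        rw [if_neg (by push_cast; rw [hmod]; omega)]
        show pvRow (m : Int) ++ [2 * ((m : Nat) + 1 : Int) + 1] = _
        unfold pvRow
        push_cast
        rw [show (2 * ((m : Int) + 1) + 1) = (2 * (m : Int) + 1) + 2 by ring,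
          pvE1 1 (2 * (m : Int) + 1) (by omega) (by omega)]
      · -- m odd, so index m+1 is even: drop the last column, then append
        obtain ⟨k, hk⟩ := ho
        rw [if_pos (by push_cast; rw [hmod]; constructor <;> omega)]
        show (pvRow (m : Int)).dropLast ++ [2 * ((m : Nat) + 1 : Int) + 1] = _
        unfold pvRow
        rw [List.dropLast_concat]
        push_cast
        rw [show (2 * ((m : Int) + 1) + 1) = (2 * (m : Int) + 1) + 2 by ring,
          ← pvE2 1 (2 * (m : Int) + 1) (by omega)]

-- a loop whose guard is false returns immediately, any fuel
theorem pvAWhileF_stop (fuel : Nat) (i j : Int) (res : List (List Int)) (h : ¬ j ≤ 2 * i + 1) :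
    pvAWhileF fuel i j res = (res, j) := by
  cases fuel <;> simp [pvAWhileF, h]

-- the whole row A produces for index i, starting the while loop at j, equals the mapped row
theorem pvAWhileF_row (fuel : Nat) (i j : Int) (res : List (List Int))
    (hf : (2 * i + 2 - j).toNat ≤ fuel) (hj : j ≤ 2 * i + 1) :
    (if (pvAWhileF fuel i j res).2 ≠ 2 * i + 5 then (pvAWhileF fuel i j res).1 ++ [[i + 1, 2 * i + 1]]
     else (pvAWhileF fuel i j res).1)
    = res ++ (PySem.List.pyRange j (2 * i + 1) 4 ++ [2 * i + 1]).map (fun c => [i + 1, c]) := by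
  induction fuel generalizing j res with
  | zero => omega
  | succ f ih =>
      rw [show pvAWhileF (f + 1) i j res = pvAWhileF f i (j + 4) (res ++ [[i + 1, j]]) from by
        simp [pvAWhileF, hj]]
      by_cases h4 : j + 4 ≤ 2 * i + 1
      · rw [ih (j + 4) (res ++ [[i + 1, j]]) (by omega) h4,
          pvPyRange_four_cons j (2 * i + 1) (by omega)]
        simp
      · rw [pvAWhileF_stop f i (j + 4) _ h4]
        by_cases hje : j = 2 * i + 1
        · subst hje
          rw [if_neg (by omega), pvPyRange_four_nil _ _ le_rfl]
          simp
        · rw [if_pos (by omega), pvPyRange_four_cons j (2 * i + 1) (by omega),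
            pvPyRange_four_nil (j + 4) (2 * i + 1) (by omega)]
          simp

theorem pvAWhile_row (i j : Int) (res : List (List Int)) (hj : j ≤ 2 * i + 1) :
    (if (pvAWhile i j res).2 ≠ 2 * i + 5 then (pvAWhile i j res).1 ++ [[i + 1, 2 * i + 1]]
     else (pvAWhile i j res).1)
    = res ++ (PySem.List.pyRange j (2 * i + 1) 4 ++ [2 * i + 1]).map (fun c => [i + 1, c]) := by
  unfold pvAWhile
  exact pvAWhileF_row _ i j res le_rfl hj

-- appending one more index to A's fold appends exactly row n
theorem pvA_succ (n : Nat) :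
    sandyLandManagement ((n : Int) + 1)
      = sandyLandManagement (n : Int) ++ (pvRow (n : Int)).map (fun c => [(n : Int) + 1, c]) := by
  unfold sandyLandManagement
  rw [show ((n : Int) + 1) = (n : Int) + 1 from rfl,
    PySem.List.pyRange_one_succ_right (by omega : (0 : Int) ≤ (n : Int)), List.foldl_append]
  simp only [List.foldl_cons, List.foldl_nil]
  exact pvAWhile_row (n : Int) 1 _ (by omega)

-- main invariant: B's fold state is (A's output, the carried column list)
theorem pvMain (n : Nat) :
    (PySem.List.pyRange 0 (n : Int) 1).foldl pvBStep ([], [])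
      = (sandyLandManagement (n : Int), pvCols n) := by
  induction n with
  | zero =>
      rw [PySem.List.pyRange_one_eq_nil (by omega)]
      unfold sandyLandManagement
      rw [PySem.List.pyRange_one_eq_nil (by omega)]
      rfl
  | succ m ih =>
      push_cast
      rw [PySem.List.pyRange_one_succ_right (by omega : (0 : Int) ≤ (m : Int)), List.foldl_append,
        ih]
      simp only [List.foldl_cons, List.foldl_nil]
      unfold pvBStep
      simp only []
      rw [pvColsStep m]
      refine Prod.ext ?_ rfl
      exact (pvA_succ m).symm

-- ===== VERDICT (by name: the statement is the Claim_ definition above) =====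
theorem sandyLandManagement_spec : Claim_equal_sandyLandManagement := by
  intro size _
  unfold Spec_sandyLandManagement
  by_cases hs : size ≤ 0
  · unfold sandyLandManagement sandyLandManagement_alt
    rw [PySem.List.pyRange_one_eq_nil hs]
    rfl
  · have h : size = (size.toNat : Int) := by omega
    rw [h]
    unfold sandyLandManagement_alt
    rw [pvMain size.toNat]
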